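-- pv_equiv track=rewrite | github.com/MontyPython-ManuL/Collection_framework | func_reverse.py | rev_text
-- ===== SOURCE A (Python) =====
-- def rev_text(text):
--     result = []
--     for item in text.split():
--         part_word2 = iter([i for i in item if i.isalpha()][::-1])
--         for i in [i for i in item]:
--             if not i.isalpha():
--                 result.append(i)
--             elif i.isalpha():
--                 result.append(next(part_word2))
--         result.append(' ')
--
--     return ''.join([i for i in result]).strip()
-- ===== SOURCE B (Python) =====
-- def rev_text(text):
--     words = []
--     for w in text.split():
--         chars = list(w)
--         left, right = 0, len(chars) - 1
--         while left < right:
--             if not chars[left].isalpha():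
--                 left += 1
--             elif not chars[right].isalpha():
--                 right -= 1
--             else:
--                 chars[left], chars[right] = chars[right], chars[left]
--                 left += 1
--                 right -= 1
--         words.append(''.join(chars))
--     return ' '.join(words)
-- ===== Notes on version B (the rewrite author's own statement) =====
-- stated objective: alternative
-- what changed: Per word, B swaps alphabetic characters in place with two converging pointers and joins words with ' '.join, instead of A's pre-built reversed-alpha iterator consumed once per alphabetic position followed by a global join+strip.
import Mathlib
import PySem

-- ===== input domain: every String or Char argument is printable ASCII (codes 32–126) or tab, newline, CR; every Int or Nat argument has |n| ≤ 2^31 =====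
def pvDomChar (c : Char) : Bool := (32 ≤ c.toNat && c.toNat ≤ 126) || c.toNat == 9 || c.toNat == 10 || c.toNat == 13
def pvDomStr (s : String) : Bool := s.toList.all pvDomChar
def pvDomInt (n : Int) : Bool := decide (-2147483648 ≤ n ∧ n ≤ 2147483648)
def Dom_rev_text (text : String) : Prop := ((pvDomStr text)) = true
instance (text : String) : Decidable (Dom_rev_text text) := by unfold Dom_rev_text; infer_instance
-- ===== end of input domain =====

-- B reverses each word's alphabetic characters with two converging pointers swapping in place and
-- joins the words with ' '.join, instead of A's reversed-alpha iterator consumed once per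
-- alphabetic position followed by a global join-with-trailing-space and strip. Same cost, different
-- decomposition (objective: alternative).

-- ===== PORT A =====
-- inner for-loop state: (result, iterator remainder); next(part_word2) pops the head.
-- The [] iterator case is unreachable (the iterator holds exactly one char per alphabetic
-- position of the word; Python's next would raise StopIteration there); we append nothing.
def rev_text (text : String) : String :=
  let result : List Char :=
    (PySem.Str.split₀ text).foldl (fun result item =>
      -- [i for i in item if i.isalpha()][::-1]  ([::-1] is reversal)
      let part_word2 := (item.toList.filter PySem.Chars.isalpha).reverse
      let st := item.toList.foldl (fun (st : List Char × List Char) i =>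
          if (PySem.Chars.isalpha i) = false then (st.1 ++ [i], st.2)
          else match st.2 with
               | x :: rest => (st.1 ++ [x], rest)
               | [] => (st.1, [])
        ) (result, part_word2)
      st.1 ++ [' ']) []
  -- ''.join([i for i in result]).strip()
  PySem.Str.strip (String.ofList result)

-- ===== PORT B =====
-- the while-loop of Source B; left/right are Python ints, but words are nonempty so right = len-1 ≥ 0
-- is faithfully a Nat (for an empty list both Python's right = -1 and Nat's 0-1 = 0 skip the loop).
def revB_go (chars : List Char) (left right : Nat) : List Char :=
  if _h : left < right then
    if PySem.Chars.isalpha (chars.getD left ' ') = false then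
      revB_go chars (left + 1) right
    else if PySem.Chars.isalpha (chars.getD right ' ') = false then
      revB_go chars left (right - 1)
    else
      revB_go ((chars.set left (chars.getD right ' ')).set right (chars.getD left ' '))
        (left + 1) (right - 1)
  else chars
termination_by right - left
decreasing_by all_goals omega

def rev_text_alt (text : String) : String :=
  let words := (PySem.Str.split₀ text).map (fun w =>
    let chars := w.toList
    String.ofList (revB_go chars 0 (chars.length - 1)))
  PySem.Str.join " " words

-- ===== PRECONDITION & SPEC =====
def Spec_rev_text (text : String) (out : String) : Prop := out = rev_text_alt text
instance (text : String) (out : String) : Decidable (Spec_rev_text text out) := by unfold Spec_rev_text; infer_instance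

-- ===== CLAIM (what is proved, stated in full; the proofs are below) =====
def Claim_equal_rev_text : Prop := ∀ (text : String), Dom_rev_text text → Spec_rev_text text (rev_text text)

-- ===== LEMMAS AND PROOFS =====

def fillA : List Char → List Char → List Char
  | [], _ => []
  | c :: cs, r =>
    if PySem.Chars.isalpha c = false then c :: fillA cs r
    else match r with
      | x :: rs => x :: fillA cs rs
      | [] => fillA cs []

def tp (l : List Char) : List Char :=
  match l with
  | [] => []
  | [c] => [c]
  | c :: d :: cs =>
    if PySem.Chars.isalpha c = false then c :: tp (d :: cs)
    else
      match (d :: cs).getLast? with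
      | none => [c]   -- unreachable: d :: cs is nonempty
      | some e =>
        if PySem.Chars.isalpha e = false then tp (c :: (d :: cs).dropLast) ++ [e]
        else e :: tp ((d :: cs).dropLast) ++ [c]
termination_by l.length
decreasing_by all_goals (simp [List.length_dropLast]; try omega)

theorem fillA_append (xs ys r : List Char) :
    fillA (xs ++ ys) r
      = fillA xs r ++ fillA ys (r.drop (xs.countP (fun c => PySem.Chars.isalpha c))) := by
  induction xs generalizing r with
  | nil => simp [fillA]
  | cons c cs ih =>
    by_cases h : PySem.Chars.isalpha c = false
    · simp [fillA, h, ih, List.countP_cons]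
    · cases r with
      | nil => simp [fillA, h, ih, List.countP_cons]
      | cons x rs => simp [fillA, h, ih, List.countP_cons]

theorem fillA_take (xs r : List Char)
    (h : xs.countP (fun c => PySem.Chars.isalpha c) ≤ r.length) (extra : List Char) :
    fillA xs (r ++ extra) = fillA xs r := by
  induction xs generalizing r with
  | nil => simp [fillA]
  | cons c cs ih =>
    by_cases hc : PySem.Chars.isalpha c = false
    · simp only [List.countP_cons, hc] at h
      simp [fillA, hc, ih r (by simpa using h)]
    · cases r with
      | nil => exfalso; simp [List.countP_cons, hc] at h
      | cons x rs =>
        simp only [List.countP_cons, hc, if_true] at h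
        simp only [decide_true, List.length_cons] at h
        simp [fillA, hc, ih rs (by omega)]

theorem fillA_eq_tp_aux : ∀ (n : Nat) (l : List Char), l.length ≤ n →
    fillA l ((l.filter (fun c => PySem.Chars.isalpha c)).reverse) = tp l := by
  intro n
  induction n with
  | zero =>
    intro l hl
    have : l = [] := List.eq_nil_of_length_eq_zero (by omega)
    subst this; simp [fillA, tp]
  | succ n ih =>
    intro l hl
    match l with
    | [] => simp [fillA, tp]
    | [c] => by_cases hc : PySem.Chars.isalpha c = false <;> simp [fillA, tp, hc]
    | c :: d :: cs =>
      simp only [List.length_cons] at hl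
      obtain ⟨mid, e, hmid⟩ : ∃ mid e, d :: cs = mid ++ [e] :=
        ⟨_, _, (List.dropLast_concat_getLast (l := d :: cs) (by simp)).symm⟩
      have hml : mid.length + 1 = cs.length + 1 := by
        have := congrArg List.length hmid; simp at this; omega
      rw [tp]
      by_cases hc : PySem.Chars.isalpha c = false
      · simp only [hc, if_true]
        rw [List.filter_cons]
        simp only [fillA, hc, Bool.false_eq_true, ite_false, if_true]
        exact congrArg _ (ih (d :: cs) (by simp; omega))
      · simp only [hc, ite_false]
        rw [hmid, List.getLast?_concat, List.dropLast_concat]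
        by_cases he : PySem.Chars.isalpha e = false
        · simp only [he, if_true]
          -- LHS: fillA (c :: mid ++ [e]) (reverse (filter (c :: mid ++ [e])))
          have hfil : List.filter (fun c => PySem.Chars.isalpha c) (c :: mid ++ [e])
              = List.filter (fun c => PySem.Chars.isalpha c) (c :: mid) := by
            simp [List.filter_append, List.filter_cons, he]
          rw [show c :: (mid ++ [e]) = (c :: mid) ++ [e] from rfl, hfil, fillA_append]
          have hk : ((List.filter (fun c => PySem.Chars.isalpha c) (c :: mid)).reverse).length
              = (c :: mid).countP (fun c => PySem.Chars.isalpha c) := by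
            simp [← List.countP_eq_length_filter]
          rw [List.drop_of_length_le (by omega)]
          rw [ih (c :: mid) (by simp; omega)]
          simp [fillA, he]
        · simp only [he, ite_false]
          have hfil : List.filter (fun c => PySem.Chars.isalpha c) (c :: (mid ++ [e]))
              = c :: List.filter (fun c => PySem.Chars.isalpha c) mid ++ [e] := by
            have hc' : PySem.Chars.isalpha c = true := by revert hc; cases PySem.Chars.isalpha c <;> simp
            have he' : PySem.Chars.isalpha e = true := by revert he; cases PySem.Chars.isalpha e <;> simp
            simp [List.filter_append, List.filter_cons, hc', he']
          rw [hfil]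
          have hrev : (c :: List.filter (fun c => PySem.Chars.isalpha c) mid ++ [e]).reverse
              = e :: ((List.filter (fun c => PySem.Chars.isalpha c) mid).reverse ++ [c]) := by
            simp
          rw [hrev]
          simp only [fillA, hc, Bool.true_eq_false, ite_false]
          rw [fillA_append]
          have hk : ((List.filter (fun c => PySem.Chars.isalpha c) mid).reverse).length
              = mid.countP (fun c => PySem.Chars.isalpha c) := by
            simp [← List.countP_eq_length_filter]
          have hdrop : (((List.filter (fun c => PySem.Chars.isalpha c) mid).reverse) ++ [c]).drop
              (mid.countP (fun c => PySem.Chars.isalpha c)) = [c] := by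
            rw [← hk]; simpa using List.drop_left _ _
          rw [fillA_take mid _ (by omega) [c], hdrop]
          rw [ih mid (by omega)]
          simp [fillA, he]

theorem fillA_eq_tp (l : List Char) :
    fillA l ((l.filter (fun c => PySem.Chars.isalpha c)).reverse) = tp l :=
  fillA_eq_tp_aux l.length l le_rfl
theorem tp_seg_one (cs : List Char) (i : Nat) (hi : i < cs.length) :
    cs.take i ++ tp ((cs.drop i).take 1) ++ cs.drop (i + 1) = cs := by
  rw [List.drop_eq_getElem_cons hi]
  simp only [List.take_succ_cons, List.take_zero]
  rw [tp]
  conv_rhs => rw [← List.take_append_drop i cs]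
  rw [List.drop_eq_getElem_cons hi]
  simp

theorem revB_go_eq_tp : ∀ (n : Nat) (cs : List Char) (l r : Nat), r - l ≤ n → r < cs.length → l ≤ r + 1 →
    revB_go cs l r = cs.take l ++ tp ((cs.drop l).take (r + 1 - l)) ++ cs.drop (r + 1) := by
  intro n
  induction n with
  | zero =>
    intro cs l r hn hr hl
    rw [revB_go, dif_neg (by omega)]
    rcases Nat.eq_or_lt_of_le hl with h | h
    · rw [h]
      simp [tp, List.take_append_drop]
    · have hlr : l = r := by omega
      rw [hlr, show r + 1 - r = 1 from by omega]
      exact (tp_seg_one cs r hr).symm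
  | succ n ih =>
    intro cs l r hn hr hl
    rw [revB_go]
    by_cases h : l < r
    · rw [dif_pos h]
      have hl' : l < cs.length := by omega
      have hgl : cs.getD l ' ' = cs[l] := List.getD_eq_getElem cs ' ' hl'
      have hgr : cs.getD r ' ' = cs[r] := List.getD_eq_getElem cs ' ' hr
      rw [hgl, hgr]
      have hdropl : cs.drop l = cs[l] :: cs.drop (l + 1) := List.drop_eq_getElem_cons hl'
      have hseg : (cs.drop l).take (r + 1 - l)
          = cs[l] :: (cs.drop (l + 1)).take (r - l) := by
        rw [hdropl, show r + 1 - l = (r - l) + 1 from by omega, List.take_succ_cons]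
      by_cases ha : PySem.Chars.isalpha cs[l] = false
      · -- left char non-alpha: advance left
        rw [if_pos ha]
        rw [ih cs (l + 1) r (by omega) hr (by omega)]
        rw [show r + 1 - (l + 1) = r - l from by omega]
        have hlen : 1 ≤ ((cs.drop (l + 1)).take (r - l)).length := by
          simp [List.length_take, List.length_drop]; omega
        obtain ⟨x, xs, hxx⟩ : ∃ x xs, (cs.drop (l + 1)).take (r - l) = x :: xs := by
          cases hc : (cs.drop (l + 1)).take (r - l) with
          | nil => rw [hc] at hlen; simp at hlen
          | cons x xs => exact ⟨x, xs, rfl⟩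
        rw [hseg, hxx]
        conv_rhs => rw [tp]
        rw [if_pos ha, ← hxx]
        rw [List.take_succ_eq_append_getElem hl']
        simp only [List.append_assoc, List.cons_append, List.nil_append, List.singleton_append]
      · rw [if_neg ha]
        have hlen2 : r - l - 1 < (cs.drop (l + 1)).length := by simp [List.length_drop]; omega
        have hmid : (cs.drop (l + 1)).take (r - l)
            = (cs.drop (l + 1)).take (r - l - 1) ++ [cs[r]] := by
          rw [show r - l = (r - l - 1) + 1 from by omega, List.take_succ_eq_append_getElem hlen2]
          congr 2
          rw [List.getElem_drop]
          congr 1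
          omega
        obtain ⟨x, xs, hxx⟩ : ∃ x xs,
            (cs.drop (l + 1)).take (r - l - 1) ++ [cs[r]] = x :: xs := by
          cases hc : (cs.drop (l + 1)).take (r - l - 1) ++ [cs[r]] with
          | nil => simp at hc
          | cons x xs => exact ⟨x, xs, rfl⟩
        by_cases hb : PySem.Chars.isalpha cs[r] = false
        · -- right char non-alpha: retreat right
          rw [if_pos hb]
          rw [ih cs l (r - 1) (by omega) (by omega) (by omega)]
          rw [show r - 1 + 1 = r from by omega]
          have hseg2 : (cs.drop l).take (r - l) = cs[l] :: (cs.drop (l + 1)).take (r - l - 1) := by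
            rw [hdropl]
            cases hq : r - l with
            | zero => omega
            | succ k =>
              rw [List.take_succ_cons]
              simp
          rw [hseg, hmid, hxx]
          conv_rhs => rw [tp]
          rw [if_neg ha, ← hxx]
          rw [List.getLast?_concat, List.dropLast_concat]
          simp only [hb, if_true]
          rw [hseg2]
          rw [List.drop_eq_getElem_cons hr]
          simp [List.append_assoc]
        · -- both alpha: swap
          rw [if_neg hb]
          have hlen' : ((cs.set l cs[r]).set r cs[l]).length = cs.length := by simp
          rw [ih ((cs.set l cs[r]).set r cs[l]) (l + 1) (r - 1) (by omega) (by omega) (by omega)]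
          rw [show r - 1 + 1 = r from by omega]
          have hG1 : ((cs.set l cs[r]).set r cs[l]).take (l + 1) = cs.take l ++ [cs[r]] := by
            rw [List.take_succ_eq_append_getElem (by omega)]
            congr 1
            · rw [List.take_set_of_le (by omega), List.take_set_of_le (by omega)]
            · congr 1
              simp only [List.getElem_set]
              split_ifs <;> first | rfl | omega
          have hG2 : ((cs.set l cs[r]).set r cs[l]).drop r = cs[l] :: cs.drop (r + 1) := by
            rw [List.drop_eq_getElem_cons (by omega)]
            congr 1
            · simp only [List.getElem_set]
              split_ifs <;> first | rfl | omega
            · rw [List.drop_set_of_lt (by omega), List.drop_set_of_lt (by omega)]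
          have hG3 : (((cs.set l cs[r]).set r cs[l]).drop (l + 1)).take (r - (l + 1))
              = (cs.drop (l + 1)).take (r - l - 1) := by
            rw [show r - (l + 1) = r - l - 1 from by omega]
            apply List.ext_getElem
            · simp [List.length_take, List.length_drop]
            · intro j h1 h2
              simp only [List.length_take, List.length_drop, hlen'] at h1
              simp only [List.getElem_take, List.getElem_drop, List.getElem_set]
              split_ifs <;> first | rfl | omega
          rw [hG1, hG2, hG3]
          rw [hseg, hmid, hxx]
          conv_rhs => rw [tp]
          rw [if_neg ha, ← hxx]
          rw [List.getLast?_concat, List.dropLast_concat]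
          simp only [hb, ite_false]
          simp [List.append_assoc]
    · rw [dif_neg h]
      rcases Nat.eq_or_lt_of_le hl with h2 | h2
      · rw [h2]
        simp [tp, List.take_append_drop]
      · have hlr : l = r := by omega
        rw [hlr, show r + 1 - r = 1 from by omega]
        exact (tp_seg_one cs r hr).symm

theorem revB_eq_tp (cs : List Char) : revB_go cs 0 (cs.length - 1) = tp cs := by
  cases cs with
  | nil => rw [revB_go]; simp [tp]
  | cons c cs =>
    have h := revB_go_eq_tp ((c :: cs).length - 1) (c :: cs) 0 ((c :: cs).length - 1)
      (by omega) (by simp) (by omega)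
    simpa using h

-- ===== split₀ word facts =====

theorem split₀_go_words : ∀ (s cur : List Char) (acc : List (List Char)),
    (∀ c ∈ cur, PySem.Chars.isspace c = false) →
    (∀ w ∈ acc, w ≠ [] ∧ ∀ c ∈ w, PySem.Chars.isspace c = false) →
    ∀ w ∈ PySem.Chars.split₀.go s cur acc,
      w ≠ [] ∧ ∀ c ∈ w, PySem.Chars.isspace c = false := by
  intro s
  induction s with
  | nil =>
    intro cur acc hcur hacc w hw
    rw [PySem.Chars.split₀.go] at hw
    by_cases hc : cur.isEmpty
    · rw [if_pos hc] at hw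
      exact hacc w (by simpa using hw)
    · rw [if_neg hc] at hw
      simp only [List.mem_reverse, List.mem_cons] at hw
      rcases hw with hw | hw
      · subst hw
        constructor
        · simp only [ne_eq, List.reverse_eq_nil_iff]
          intro h; rw [h] at hc; simp at hc
        · intro c hcmem
          exact hcur c (by simpa using hcmem)
      · exact hacc w (by simpa using hw)
  | cons c rest ih =>
    intro cur acc hcur hacc w hw
    rw [PySem.Chars.split₀.go] at hw
    by_cases hs : PySem.Chars.isspace c
    · rw [if_pos hs] at hw
      by_cases hc : cur.isEmpty
      · rw [if_pos hc] at hw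
        exact ih [] acc (by simp) hacc w hw
      · rw [if_neg hc] at hw
        refine ih [] (cur.reverse :: acc) (by simp) ?_ w hw
        intro v hv
        rcases List.mem_cons.mp hv with hv | hv
        · subst hv
          constructor
          · simp only [ne_eq, List.reverse_eq_nil_iff]
            intro h; rw [h] at hc; simp at hc
          · intro d hd; exact hcur d (by simpa using hd)
        · exact hacc v hv
    · rw [if_neg hs] at hw
      refine ih (c :: cur) acc ?_ hacc w hw
      intro d hd
      rcases List.mem_cons.mp hd with hd | hd
      · subst hd; simpa using hs
      · exact hcur d hd

theorem split₀_words (s : List Char) :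
    ∀ w ∈ PySem.Chars.split₀ s, w ≠ [] ∧ ∀ c ∈ w, PySem.Chars.isspace c = false :=
  split₀_go_words s [] [] (by simp) (by simp)

-- ===== A's accumulator loop, flattened =====

theorem fillA_foldl (cs : List Char) (res r : List Char) :
    (cs.foldl (fun (st : List Char × List Char) i =>
        if (PySem.Chars.isalpha i) = false then (st.1 ++ [i], st.2)
        else match st.2 with
             | x :: rest => (st.1 ++ [x], rest)
             | [] => (st.1, [])) (res, r)).1 = res ++ fillA cs r := by
  induction cs generalizing res r with
  | nil => simp [fillA]
  | cons c cs ih =>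
    simp only [List.foldl_cons, fillA]
    by_cases h : PySem.Chars.isalpha c = false
    · simp [h, ih]
    · simp only [h, ite_false]
      cases r with
      | nil => simp [ih]
      | cons x rs => simp [ih]

theorem resultA (ws : List (List Char)) (res : List Char) :
    ws.foldl (fun result item =>
        (item.foldl (fun (st : List Char × List Char) i =>
            if (PySem.Chars.isalpha i) = false then (st.1 ++ [i], st.2)
            else match st.2 with
                 | x :: rest => (st.1 ++ [x], rest)
                 | [] => (st.1, []))
          (result, (item.filter PySem.Chars.isalpha).reverse)).1 ++ [' ']) res
      = res ++ (ws.map (fun w =>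
          fillA w ((w.filter (fun c => PySem.Chars.isalpha c)).reverse) ++ [' '])).flatten := by
  induction ws generalizing res with
  | nil => simp
  | cons w ws ih =>
    simp only [List.foldl_cons, List.map_cons, List.flatten_cons]
    rw [fillA_foldl, ih]
    simp [List.append_assoc]

-- ===== strip / intercalate assembly =====

theorem rstrip_append_space (A : List Char) :
    PySem.Chars.rstrip (A ++ [' ']) = PySem.Chars.rstrip A := by
  unfold PySem.Chars.rstrip
  rw [List.reverse_append]
  simp only [List.reverse_cons, List.reverse_nil, List.nil_append, List.singleton_append]
  rw [List.dropWhile_cons_of_pos (by simp [PySem.Chars.isspace])]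

theorem rstrip_append_of_nonspace (A B : List Char)
    (h : PySem.Chars.rstrip B ≠ []) :
    PySem.Chars.rstrip (A ++ B) = A ++ PySem.Chars.rstrip B := by
  unfold PySem.Chars.rstrip at *
  rw [List.reverse_append, List.dropWhile_append]
  have hne : (List.dropWhile PySem.Chars.isspace B.reverse).isEmpty = false := by
    cases hq : List.dropWhile PySem.Chars.isspace B.reverse with
    | nil => exfalso; apply h; rw [hq]; simp
    | cons x xs => simp
  rw [hne]
  simp

theorem rstrip_eq_self (X : List Char) (hX : X ≠ [])
    (h : ∀ c ∈ X, PySem.Chars.isspace c = false) :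
    PySem.Chars.rstrip X = X := by
  unfold PySem.Chars.rstrip
  cases hq : X.reverse with
  | nil => exfalso; apply hX; simpa using congrArg List.reverse hq
  | cons c cr =>
    rw [List.dropWhile_cons_of_neg]
    · rw [← hq, List.reverse_reverse]
    · have hc : c ∈ X := by
        rw [← List.mem_reverse, hq]; simp
      simp [h c hc]

theorem intercalate_cons_ne_nil (sep a : List Char) (t : List (List Char)) (ha : a ≠ []) :
    List.intercalate sep (a :: t) ≠ [] := by
  cases t with
  | nil => simpa [List.intercalate] using ha
  | cons b t =>
    simp [List.intercalate]
    intro hcon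
    exact absurd hcon ha

theorem rstrip_flatten (f : List Char → List Char) (ws : List (List Char))
    (hne : ∀ w ∈ ws, f w ≠ [])
    (hns : ∀ w ∈ ws, ∀ c ∈ f w, PySem.Chars.isspace c = false) :
    PySem.Chars.rstrip ((ws.map (fun w => f w ++ [' '])).flatten)
      = List.intercalate [' '] (ws.map f) := by
  induction ws with
  | nil => simp [PySem.Chars.rstrip, List.intercalate]
  | cons w rest ih =>
    simp only [List.map_cons, List.flatten_cons]
    cases rest with
    | nil =>
      simp only [List.map_nil, List.flatten_nil, List.append_nil]
      rw [rstrip_append_space, rstrip_eq_self (f w) (hne w (by simp)) (hns w (by simp))]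
      simp [List.intercalate]
    | cons v t =>
      rw [show f w ++ [' '] ++ (((v :: t).map (fun w => f w ++ [' '])).flatten)
            = (f w ++ [' ']) ++ (((v :: t).map (fun w => f w ++ [' '])).flatten) from rfl]
      rw [rstrip_append_of_nonspace]
      · rw [ih (fun u hu => hne u (by simp [hu])) (fun u hu => hns u (by simp [hu]))]
        simp only [List.map_cons]
        rw [List.append_assoc]
        exact (by simp [List.intercalate] :
          List.intercalate [' '] (f w :: f v :: t.map f)
            = f w ++ ([' '] ++ List.intercalate [' '] (f v :: t.map f))).symm
      · rw [ih (fun u hu => hne u (by simp [hu])) (fun u hu => hns u (by simp [hu]))]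
        simp only [List.map_cons]
        exact intercalate_cons_ne_nil [' '] (f v) (t.map f) (hne v (by simp))

theorem strip_flatten (f : List Char → List Char) (ws : List (List Char))
    (hne : ∀ w ∈ ws, f w ≠ [])
    (hns : ∀ w ∈ ws, ∀ c ∈ f w, PySem.Chars.isspace c = false) :
    PySem.Chars.strip ((ws.map (fun w => f w ++ [' '])).flatten)
      = List.intercalate [' '] (ws.map f) := by
  unfold PySem.Chars.strip
  cases ws with
  | nil => simp [PySem.Chars.lstrip, PySem.Chars.rstrip, List.intercalate]
  | cons w rest =>
    have hlstrip : PySem.Chars.lstrip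
        (((w :: rest).map (fun w => f w ++ [' '])).flatten)
        = ((w :: rest).map (fun w => f w ++ [' '])).flatten := by
      unfold PySem.Chars.lstrip
      simp only [List.map_cons, List.flatten_cons]
      cases hq : f w with
      | nil => exact absurd hq (hne w (by simp))
      | cons c cr =>
        simp only [List.cons_append]
        rw [List.dropWhile_cons_of_neg]
        have hc : c ∈ f w := by rw [hq]; simp
        simp [hns w (by simp) c hc]
    rw [hlstrip]
    exact rstrip_flatten f (w :: rest) hne hns

theorem fillA_mem (xs r : List Char) (c : Char) (h : c ∈ fillA xs r) : c ∈ xs ∨ c ∈ r := by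
  induction xs generalizing r with
  | nil => simp [fillA] at h
  | cons d ds ih =>
    by_cases hd : PySem.Chars.isalpha d = false
    · simp [fillA, hd] at h
      rcases h with h | h
      · simp [h]
      · rcases ih r h with h | h <;> simp [h]
    · cases r with
      | nil =>
        simp [fillA, hd] at h
        rcases ih [] h with h | h
        · simp [h]
        · simp at h
      | cons x rs =>
        simp [fillA, hd] at h
        rcases h with h | h
        · simp [h]
        · rcases ih rs h with h | h <;> simp [h]

theorem fillA_length (xs r : List Char)
    (h : xs.countP (fun c => PySem.Chars.isalpha c) ≤ r.length) :
    (fillA xs r).length = xs.length := by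
  induction xs generalizing r with
  | nil => simp [fillA]
  | cons c cs ih =>
    by_cases hc : PySem.Chars.isalpha c = false
    · simp only [List.countP_cons, hc] at h
      simp [fillA, hc, ih r (by simpa using h)]
    · cases r with
      | nil => exfalso; simp [List.countP_cons, hc] at h
      | cons x rs =>
        simp only [List.countP_cons, hc, if_true] at h
        simp only [decide_true, List.length_cons] at h
        simp [fillA, hc, ih rs (by omega)]

theorem tp_ne_nil (w : List Char) (hw : w ≠ []) : tp w ≠ [] := by
  rw [← fillA_eq_tp]
  intro hcon
  have hlen := fillA_length w ((w.filter (fun c => PySem.Chars.isalpha c)).reverse)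
    (by simp [← List.countP_eq_length_filter])
  rw [hcon] at hlen
  simp only [List.length_nil] at hlen
  exact hw (List.eq_nil_of_length_eq_zero hlen.symm)

theorem tp_mem (w : List Char) (c : Char) (hc : c ∈ tp w) : c ∈ w := by
  rw [← fillA_eq_tp] at hc
  rcases fillA_mem _ _ _ hc with h | h
  · exact h
  · rw [List.mem_reverse, List.mem_filter] at h
    exact h.1

theorem rev_text_eq (text : String) : rev_text text = rev_text_alt text := by
  unfold rev_text rev_text_alt
  rw [PySem.Str.split₀, PySem.Str.join]
  simp only [List.foldl_map, List.map_map, Function.comp, String.toList_ofList]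
  rw [resultA]
  rw [PySem.Str.strip, String.toList_ofList]
  simp only [List.nil_append]
  congr 1
  have hwords := split₀_words text.toList
  have h1 : ∀ w ∈ PySem.Chars.split₀ text.toList,
      (fun w => fillA w ((w.filter (fun c => PySem.Chars.isalpha c)).reverse)) w ≠ [] := by
    intro w hw
    simp only
    rw [fillA_eq_tp]
    exact tp_ne_nil w (hwords w hw).1
  have h2 : ∀ w ∈ PySem.Chars.split₀ text.toList, ∀ c ∈
      (fun w => fillA w ((w.filter (fun c => PySem.Chars.isalpha c)).reverse)) w,
      PySem.Chars.isspace c = false := by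
    intro w hw c hc
    simp only [fillA_eq_tp] at hc
    exact (hwords w hw).2 c (tp_mem w c hc)
  rw [strip_flatten (fun w => fillA w ((w.filter (fun c => PySem.Chars.isalpha c)).reverse))
      (PySem.Chars.split₀ text.toList) h1 h2]
  unfold PySem.Chars.join
  have hsp : (" " : String).toList = [' '] := rfl
  rw [hsp]
  congr 1
  apply List.map_congr_left
  intro w _
  simp only [Function.comp_apply, String.toList_ofList]
  rw [fillA_eq_tp, ← revB_eq_tp]

-- ===== VERDICT (by name: the statement is the Claim_ definition above) =====
theorem rev_text_spec : Claim_equal_rev_text := by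
  intro text _
  unfold Spec_rev_text
  exact rev_text_eq text
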